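-- pv_equiv track=rewrite | github.com/isaacmorneau/C-3PO | c3po/lex.py | has_function
-- ===== SOURCE A (Python) =====
-- import string
--
-- functionlike = ["if", "while", "for"]
--
-- def has_function(name, line):
--     if '(' not in line or name not in line:
--         return False
--
--     token = False
--     was_space = False
--     current_token = ""
--
--     for c in line:
--         if c == ' ':
--             was_space = True
--             continue
--         if was_space:
--             current_token = ""
--             was_space = False
--         if c in string.ascii_letters:
--             current_token += c
--             token = True
--         elif c == '(' and current_token not in functionlike:
--             if current_token == name:
--                 return True
--             else:
--                 current_token = ""
--         else:
--             current_token = ""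
--             token = False
--     return False
-- ===== SOURCE B (Python) =====
-- import string
--
-- functionlike = ["if", "while", "for"]
--
-- def _tail_run(s):
--     # maximal run of ASCII letters at the end of s
--     out = []
--     for c in reversed(s):
--         if c in string.ascii_letters:
--             out.append(c)
--         else:
--             break
--     out.reverse()
--     return ''.join(out)
--
-- def has_function(name, line):
--     if name in functionlike:
--         return False
--     for i, c in enumerate(line):
--         if c == '(' and _tail_run(line[:i]) == name:
--             return True
--     return False
-- ===== Notes on version B (the rewrite author's own statement) =====
-- stated objective: simpler
-- what changed: A streams the line through a state machine maintaining current_token/was_space/token flags with substring pre-guards; B drops the guards and flags and, at each '(' in the line, reads the maximal ASCII-letter run backwards off the end of the preceding prefix and compares it to name.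
import Mathlib
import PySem

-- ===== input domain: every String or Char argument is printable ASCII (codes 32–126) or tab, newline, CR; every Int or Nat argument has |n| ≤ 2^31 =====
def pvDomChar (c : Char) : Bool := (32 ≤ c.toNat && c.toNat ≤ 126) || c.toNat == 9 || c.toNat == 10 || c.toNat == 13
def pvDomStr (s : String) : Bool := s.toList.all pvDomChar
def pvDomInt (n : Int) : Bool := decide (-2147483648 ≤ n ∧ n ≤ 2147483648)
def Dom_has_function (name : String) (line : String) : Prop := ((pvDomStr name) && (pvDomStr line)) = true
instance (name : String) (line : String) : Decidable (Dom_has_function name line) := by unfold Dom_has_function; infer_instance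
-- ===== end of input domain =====

-- B replaces A's streaming state machine (current_token/was_space/token flags plus
-- substring pre-guards) by a per-'(' backward read of the letter run ending the prefix;
-- objective: simpler (shorter, no flag bookkeeping).

-- shared module-level constants (both Python files define the same ones)
-- string.ascii_letters membership
def pvLetter (c : Char) : Bool := decide (c ∈ "abcdefghijklmnopqrstuvwxyzABCDEFGHIJKLMNOPQRSTUVWXYZ".toList)
-- functionlike = ["if", "while", "for"]
def pvFunctionlike : List (List Char) := [['i','f'], ['w','h','i','l','e'], ['f','o','r']]

-- ===== PORT A =====
-- the `for c in line:` loop; state = (token, was_space, current_token); early `return True` = true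
def hfLoop (nm : List Char) : List Char → Bool → Bool → List Char → Bool
  | [], _, _, _ => false                                    -- loop ends: return False
  | c :: rest, token, wasSpace, cur =>
    if c = ' ' then hfLoop nm rest token true cur           -- was_space = True; continue
    -- below, `if wasSpace then [] else cur` is the `if was_space: current_token = ""` reset
    else if pvLetter c then
      hfLoop nm rest true false ((if wasSpace then [] else cur) ++ [c])  -- current_token += c; token = True
    else if c = '(' ∧ (if wasSpace then [] else cur) ∉ pvFunctionlike then
      (if (if wasSpace then [] else cur) = nm then true     -- return True
       else hfLoop nm rest token false [])                  -- current_token = ""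
    else hfLoop nm rest false false []                      -- current_token = ""; token = False

def has_function (name : String) (line : String) : Bool :=
  if ¬ (PySem.Str.isIn "(" line = true) ∨ ¬ (PySem.Str.isIn name line = true) then false
  else hfLoop name.toList line.toList false false []

-- ===== PORT B =====
-- _tail_run: walk s from the right collecting letters, break at the first non-letter,
-- reverse back (the for/break loop over reversed(s) is takeWhile of the reverse)
def tailRun (s : List Char) : List Char := (s.reverse.takeWhile pvLetter).reverse

-- the `for i, c in enumerate(line):` loop with early return
def hfAltLoop (nm : List Char) (l : List Char) : List (Int × Char) → Bool
  | [] => false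
  | ic :: rest =>
    if ic.2 = '(' ∧ tailRun (PySem.List.slice l none (some ic.1)) = nm then true
    else hfAltLoop nm l rest

def has_function_alt (name : String) (line : String) : Bool :=
  if name.toList ∈ pvFunctionlike then false
  else hfAltLoop name.toList line.toList (PySem.List.enumerate line.toList)

-- ===== PRECONDITION & SPEC =====
def Spec_has_function (name : String) (line : String) (out : Bool) : Prop := out = has_function_alt name line
instance (name : String) (line : String) (out : Bool) : Decidable (Spec_has_function name line out) := by unfold Spec_has_function; infer_instance

-- ===== CLAIM (what is proved, stated in full; the proofs are below) =====
def Claim_equal_has_function : Prop := ∀ (name : String) (line : String), Dom_has_function name line → Spec_has_function name line (has_function name line)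

-- ===== LEMMAS AND PROOFS =====

-- one step of token evolution: letters extend the run, anything else resets it
def pvStep (cur : List Char) (c : Char) : List Char := if pvLetter c then cur ++ [c] else []

-- the flag-free form of A's loop
def pvGo (nm : List Char) : List Char → List Char → Bool
  | [], _ => false
  | c :: r, cur =>
    if c = '(' ∧ cur ∉ pvFunctionlike ∧ cur = nm then true
    else pvGo nm r (pvStep cur c)

theorem pvLetter_space : pvLetter ' ' = false := by decide

theorem hfLoop_eq_go (nm : List Char) :
    ∀ (l : List Char) (tok ws : Bool) (cur : List Char),
      hfLoop nm l tok ws cur = pvGo nm l (if ws then [] else cur) := by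
  intro l
  induction l with
  | nil => intro tok ws cur; cases ws <;> rfl
  | cons c r ih =>
    intro tok ws cur
    rw [hfLoop, pvGo]
    set e := if ws = true then ([] : List Char) else cur with he
    by_cases hsp : c = ' '
    · subst hsp
      have h1 : ¬ (' ' = '(' ∧ e ∉ pvFunctionlike ∧ e = nm) := by
        rintro ⟨h, -⟩; exact absurd h (by decide)
      rw [if_pos rfl, if_neg h1, ih, pvStep, pvLetter_space]
      simp
    · rw [if_neg hsp]
      by_cases hl : pvLetter c = true
      · have h1 : ¬ (c = '(' ∧ e ∉ pvFunctionlike ∧ e = nm) := by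
          rintro ⟨h, -⟩; subst h; exact absurd hl (by decide)
        rw [if_pos hl, if_neg h1, ih, pvStep, if_pos hl]
        simp
      · rw [if_neg hl]
        by_cases hp : c = '(' ∧ e ∉ pvFunctionlike
        · rw [if_pos hp]
          by_cases heq : e = nm
          · rw [if_pos heq, if_pos ⟨hp.1, hp.2, heq⟩]
          · rw [if_neg heq, if_neg (fun h => heq h.2.2), ih, pvStep, if_neg hl]
            simp
        · rw [if_neg hp, if_neg (fun h => hp ⟨h.1, h.2.1⟩), ih, pvStep, if_neg hl]
          simp

theorem go_false_of_mem (nm : List Char) (h : nm ∈ pvFunctionlike) :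
    ∀ (l : List Char) (cur : List Char), pvGo nm l cur = false := by
  intro l
  induction l with
  | nil => intro cur; rfl
  | cons c r ih =>
    intro cur
    rw [pvGo, if_neg, ih]
    rintro ⟨-, hnot, he⟩; exact hnot (he ▸ h)

-- if the loop of A ever fires, the line contains '(' and nm extends the history suffix
theorem go_true_infix (nm : List Char) :
    ∀ (l cur h : List Char), cur <:+ h → pvGo nm l cur = true →
      '(' ∈ l ∧ nm <:+: (h ++ l) := by
  intro l
  induction l with
  | nil => intro cur h _ hgo; exact absurd hgo (by simp [pvGo])
  | cons c r ih =>
    intro cur h hsuf hgo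
    rw [pvGo] at hgo
    by_cases hc : c = '(' ∧ cur ∉ pvFunctionlike ∧ cur = nm
    · refine ⟨by simp [hc.1], ?_⟩
      rcases hc with ⟨-, -, he⟩
      exact (he ▸ hsuf.isInfix).trans (List.prefix_append h (c :: r)).isInfix
    · rw [if_neg hc] at hgo
      have hstep : pvStep cur c <:+ h ++ [c] := by
        unfold pvStep
        by_cases hl : pvLetter c = true
        · rw [if_pos hl]
          obtain ⟨t, ht⟩ := hsuf
          exact ⟨t, by rw [← List.append_assoc, ht]⟩
        · rw [if_neg hl]; exact List.nil_suffix
      obtain ⟨hmem, hinf⟩ := ih (pvStep cur c) (h ++ [c]) hstep hgo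
      exact ⟨List.mem_cons_of_mem _ hmem, by simpa [List.append_assoc] using hinf⟩

-- tailRun is what A's token evolution computes from an empty start
theorem foldl_step_eq (q : List Char) :
    ∀ cur, List.foldl pvStep cur q = if q.all pvLetter then cur ++ q else tailRun q := by
  induction q with
  | nil => intro cur; simp
  | cons c r ih =>
    intro cur
    rw [List.foldl_cons]
    by_cases hl : pvLetter c = true
    · rw [ih]
      by_cases ha : r.all pvLetter
      · simp [pvStep, hl, ha, List.all_cons]
      · have : ¬ (c :: r).all pvLetter := by simp [List.all_cons, ha]
        rw [if_neg ha, if_neg this]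
        -- tailRun r = tailRun (c :: r) since r already contains a non-letter
        unfold tailRun
        have hlen : (r.reverse.takeWhile pvLetter).length ≠ r.reverse.length := by
          intro hes
          have := List.takeWhile_eq_self_iff.mp ((List.takeWhile_prefix _).eq_of_length hes)
          exact ha (List.all_eq_true.mpr fun x hx => this x (List.mem_reverse.mpr hx))
        rw [List.reverse_cons, List.takeWhile_append, if_neg hlen]
    · have : pvStep cur c = [] := by simp [pvStep, hl]
      rw [this, ih]
      have hnc : ¬ (c :: r).all pvLetter := by simp [List.all_cons, hl]
      rw [if_neg hnc]
      by_cases ha : r.all pvLetter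
      · rw [if_pos ha, List.nil_append]
        unfold tailRun
        have : r.reverse.takeWhile pvLetter = r.reverse := List.takeWhile_eq_self_iff.mpr (by simpa [List.all_reverse] using ha)
        rw [List.reverse_cons, List.takeWhile_append, this, if_pos rfl]
        simp [hl]
      · rw [if_neg ha]
        unfold tailRun
        have hlen : (r.reverse.takeWhile pvLetter).length ≠ r.reverse.length := by
          intro hes
          have := List.takeWhile_eq_self_iff.mp ((List.takeWhile_prefix _).eq_of_length hes)
          exact ha (List.all_eq_true.mpr fun x hx => this x (List.mem_reverse.mpr hx))
        rw [List.reverse_cons, List.takeWhile_append, if_neg hlen]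

theorem tailRun_all (q : List Char) (h : q.all pvLetter) : tailRun q = q := by
  unfold tailRun
  rw [List.takeWhile_eq_self_iff.mpr (by simpa [List.all_reverse] using h), List.reverse_reverse]

theorem tailRun_eq_foldl (q : List Char) : tailRun q = List.foldl pvStep [] q := by
  rw [foldl_step_eq]
  by_cases h : q.all pvLetter
  · rw [if_pos h, List.nil_append, tailRun_all q h]
  · rw [if_neg h]

theorem tailRun_suffix (q : List Char) : tailRun q <:+ q := by
  unfold tailRun
  have := List.takeWhile_prefix (l := q.reverse) (p := pvLetter)
  exact List.reverse_prefix.mp (by simpa using this)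

-- B's loop over enumerate equals the flag-free machine started on the processed prefix's run
theorem altLoop_eq_go (nm : List Char) (hnm : nm ∉ pvFunctionlike) :
    ∀ (r p : List Char),
      hfAltLoop nm (p ++ r) (PySem.List.enumerate r (p.length : Int)) = pvGo nm r (tailRun p) := by
  intro r
  induction r with
  | nil => intro p; rfl
  | cons c r' ih =>
    intro p
    rw [PySem.List.enumerate, hfAltLoop]
    have hsl : PySem.List.slice (p ++ c :: r') none (some ((p.length : Nat) : Int)) = p := by
      rw [PySem.List.slice_to_natCast, List.take_left]
    by_cases hc : c = '(' ∧ tailRun p = nm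
    · rw [if_pos (by simpa [hsl] using hc), pvGo,
         if_pos ⟨hc.1, by rw [hc.2]; exact hnm, hc.2⟩]
    · rw [if_neg (by simpa [hsl] using hc)]
      have harr : (p.length : Int) + 1 = ((p ++ [c]).length : Int) := by simp
      rw [harr]
      have := ih (p ++ [c])
      rw [List.append_assoc] at this
      rw [List.singleton_append] at this
      rw [this, pvGo, if_neg (by rintro ⟨h1, -, h3⟩; exact hc ⟨h1, h3⟩)]
      congr 1
      rw [tailRun_eq_foldl, tailRun_eq_foldl, List.foldl_append, List.foldl_cons, List.foldl_nil]

-- B's loop, when it fires, exhibits '(' in the line and nm as an infix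
theorem altLoop_true (nm l : List Char) (hloop : hfAltLoop nm l (PySem.List.enumerate l) = true) :
    '(' ∈ l ∧ nm <:+: l := by
  by_cases hnm : nm ∈ pvFunctionlike
  · -- nm can be functionlike here; argue by direct induction, generalizing the processed prefix
    have key : ∀ (r p : List Char), hfAltLoop nm (p ++ r) (PySem.List.enumerate r (p.length : Int)) = true →
        '(' ∈ r ∧ nm <:+: (p ++ r) := by
      intro r
      induction r with
      | nil => intro p h; exact absurd h (by simp [PySem.List.enumerate, hfAltLoop])
      | cons c r' ih =>
        intro p h
        rw [PySem.List.enumerate, hfAltLoop] at h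
        have hsl : PySem.List.slice (p ++ c :: r') none (some ((p.length : Nat) : Int)) = p := by
          rw [PySem.List.slice_to_natCast, List.take_left]
        by_cases hc : c = '(' ∧ tailRun (PySem.List.slice (p ++ c :: r') none (some (p.length : Int))) = nm
        · refine ⟨by simp [hc.1], ?_⟩
          have : nm <:+ p := by rw [← hc.2, hsl]; exact tailRun_suffix p
          exact this.isInfix.trans (List.prefix_append p (c :: r')).isInfix
        · rw [if_neg hc] at h
          have harr : (p.length : Int) + 1 = ((p ++ [c]).length : Int) := by simp
          rw [harr] at h
          have h' := h
          rw [show p ++ c :: r' = (p ++ [c]) ++ r' by simp] at h'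
          obtain ⟨hm, hi⟩ := ih (p ++ [c]) h'
          exact ⟨List.mem_cons_of_mem _ hm, by simpa using hi⟩
    have := key l [] (by simpa using hloop)
    simpa using this
  · have heq := altLoop_eq_go nm hnm l []
    simp only [List.nil_append, List.length_nil, Nat.cast_zero] at heq
    rw [show tailRun [] = [] from rfl] at heq
    rw [heq] at hloop
    have := go_true_infix nm l [] [] List.nil_suffix hloop
    simpa using this

-- ===== VERDICT (by name: the statement is the Claim_ definition above) =====
theorem has_function_spec : Claim_equal_has_function := by
  intro name line _
  unfold Spec_has_function has_function has_function_alt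
  by_cases hnm : name.toList ∈ pvFunctionlike
  · rw [if_pos hnm]
    by_cases hg : ¬ (PySem.Str.isIn "(" line = true) ∨ ¬ (PySem.Str.isIn name line = true)
    · rw [if_pos hg]
    · rw [if_neg hg, hfLoop_eq_go, go_false_of_mem name.toList hnm]
  · rw [if_neg hnm]
    by_cases hg : ¬ (PySem.Str.isIn "(" line = true) ∨ ¬ (PySem.Str.isIn name line = true)
    · rw [if_pos hg]
      by_contra hne
      have htrue : hfAltLoop name.toList line.toList (PySem.List.enumerate line.toList) = true := by
        cases h : hfAltLoop name.toList line.toList (PySem.List.enumerate line.toList)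
        · exact absurd h.symm hne
        · rfl
      obtain ⟨hmem, hinf⟩ := altLoop_true name.toList line.toList htrue
      rcases hg with hg | hg
      · exact hg (by
          rw [PySem.Str.isIn_iff_infix]
          simpa [List.singleton_infix_iff] using hmem)
      · exact hg ((PySem.Str.isIn_iff_infix _ _).mpr hinf)
    · rw [if_neg hg, hfLoop_eq_go]
      have heq := altLoop_eq_go name.toList hnm line.toList []
      simp only [List.nil_append, List.length_nil, Nat.cast_zero] at heq
      rw [show tailRun [] = [] from rfl] at heq
      rw [heq]
      simp
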